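-- pv_equiv track=rewrite | github.com/fkie-cad/keys-in-flux-paper-material | SSH/docker/convert_ssh_to_wireshark.py | select_encryption_key
-- ===== SOURCE A (Python) =====
-- from typing import List, Dict, Optional, Tuple
--
-- def select_encryption_key(keys: List[Dict[str, str]], implementation: str) -> Optional[str]:
--     """
--     Select the primary encryption key from parsed keys.
--
--     For wolfSSH: Prefer OUT direction KEY type
--     For Dropbear: Prefer C_ENCRYPTION_KEY_CLIENT_TO_SERVER
--     For OpenSSH: Prefer OUT direction with ChaCha20-Poly1305
--
--     Returns: key hex string, or None
--     """
--     if not keys: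
--         return None
--
--     if implementation == 'wolfssh':
--         # Prefer OUT direction, KEY type
--         for key in keys:
--             if key.get('direction') == 'OUT' and key.get('type') == 'KEY':
--                 return key['key_hex']
--         # Fallback: any KEY
--         for key in keys:
--             if key.get('type') == 'KEY':
--                 return key['key_hex']
--
--     elif implementation == 'dropbear':
--         # Prefer client-to-server encryption key
--         for key in keys:
--             if key.get('key_label') == 'C_ENCRYPTION_KEY_CLIENT_TO_SERVER':
--                 return key['key_hex']
--         # Fallback: any encryption key
--         for key in keys:
--             if 'ENCRYPTION' in key.get('key_label', ''):
--                 return key['key_hex']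
--
--     elif implementation == 'openssh':
--         # Prefer OUT direction
--         for key in keys:
--             if key.get('direction') == 'OUT':
--                 return key['key_hex']
--         # Fallback: first key
--         return keys[0]['key_hex']
--
--     # Ultimate fallback: first key with key_hex field
--     for key in keys:
--         if 'key_hex' in key:
--             return key['key_hex']
--
--     return None
-- ===== SOURCE B (Python) =====
-- def select_encryption_key(keys, implementation):
--     """Select the primary encryption key: single pass keeping the best-ranked key."""
--     if not keys:
--         return None
--
--     def rank(k):
--         if implementation == 'wolfssh':
--             if k.get('type') == 'KEY':
--                 return 0 if k.get('direction') == 'OUT' else 1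
--         elif implementation == 'dropbear':
--             lbl = k.get('key_label', '')
--             if lbl == 'C_ENCRYPTION_KEY_CLIENT_TO_SERVER':
--                 return 0
--             if 'ENCRYPTION' in lbl:
--                 return 1
--         elif implementation == 'openssh':
--             return 0 if k.get('direction') == 'OUT' else 1
--         return None
--
--     best = None      # (rank, key): first key achieving the lowest rank so far
--     fallback = None  # key_hex of the first key carrying a 'key_hex' field
--     for k in keys:
--         r = rank(k)
--         if r is not None and (best is None or r < best[0]):
--             best = (r, k)
--         if fallback is None and 'key_hex' in k:
--             fallback = k['key_hex']
--     if best is not None: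
--         return best[1]['key_hex']
--     return fallback
-- ===== Notes on version B (the rewrite author's own statement) =====
-- stated objective: alternative
-- what changed: Replaces A's staged multi-pass scans (preferred predicate, then fallback predicate, then ultimate fallback loop) with a single pass over keys that keeps the first key of minimal preference rank plus the first key_hex fallback in one accumulator.
import Mathlib
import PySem

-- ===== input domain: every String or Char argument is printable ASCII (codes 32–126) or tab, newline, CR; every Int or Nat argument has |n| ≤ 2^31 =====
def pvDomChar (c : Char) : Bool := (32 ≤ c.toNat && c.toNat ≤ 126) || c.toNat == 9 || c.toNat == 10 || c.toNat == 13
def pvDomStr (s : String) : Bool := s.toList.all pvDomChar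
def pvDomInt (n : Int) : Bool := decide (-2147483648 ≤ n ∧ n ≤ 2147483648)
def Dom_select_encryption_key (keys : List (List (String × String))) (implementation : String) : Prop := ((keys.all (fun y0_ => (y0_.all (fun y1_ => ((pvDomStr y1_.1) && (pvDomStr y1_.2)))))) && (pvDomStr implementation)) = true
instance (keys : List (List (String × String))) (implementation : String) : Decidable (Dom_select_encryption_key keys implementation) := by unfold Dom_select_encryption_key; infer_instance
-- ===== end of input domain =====

-- B replaces A's staged multi-pass scans by ONE pass keeping the first key of minimal
-- preference rank plus the first 'key_hex' fallback (alternative decomposition, same cost).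
-- Shared dict-lookup helpers (each dict is an association list; lookup = first match):
def pvGet (k : List (String × String)) (f : String) : Option String := PySem.Dict.get? ⟨k⟩ f
def pW1 (k : List (String × String)) : Bool := (pvGet k "direction" == some "OUT") && (pvGet k "type" == some "KEY")
def pW2 (k : List (String × String)) : Bool := pvGet k "type" == some "KEY"
def pD1 (k : List (String × String)) : Bool := pvGet k "key_label" == some "C_ENCRYPTION_KEY_CLIENT_TO_SERVER"
def pD2 (k : List (String × String)) : Bool := PySem.Str.isIn "ENCRYPTION" ((pvGet k "key_label").getD "")
def pO (k : List (String × String)) : Bool := pvGet k "direction" == some "OUT"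
def hasKH (k : List (String × String)) : Bool := (pvGet k "key_hex").isSome

-- ===== PORT A =====
-- one scan loop of A ('for key in keys: if p(key): return key["key_hex"]');
-- some r = the function returns r, none = the loop fell through
def skA_scan (p : List (String × String) → Bool) : List (List (String × String)) → Option (Option String)
  | [] => none
  | k :: rest => if p k then some (pvGet k "key_hex") else skA_scan p rest

-- A's ultimate fallback loop ('for key in keys: if "key_hex" in key: return key["key_hex"]')
def skA_ult : List (List (String × String)) → Option String
  | [] => none
  | k :: rest => if hasKH k then pvGet k "key_hex" else skA_ult rest

def select_encryption_key (keys : List (List (String × String))) (implementation : String) : Option String :=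
  if keys = [] then none
  else if implementation = "wolfssh" then
    match skA_scan pW1 keys with
    | some r => r
    | none =>
      match skA_scan pW2 keys with
      | some r => r
      | none => skA_ult keys
  else if implementation = "dropbear" then
    match skA_scan pD1 keys with
    | some r => r
    | none =>
      match skA_scan pD2 keys with
      | some r => r
      | none => skA_ult keys
  else if implementation = "openssh" then
    match skA_scan pO keys with
    | some r => r
    | none => pvGet (keys.headD []) "key_hex"   -- keys[0]['key_hex'] (keys ≠ [] here)
  else skA_ult keys

-- ===== PORT B =====
-- B's rank function: rank of a key under the implementation's preference, none = no match
def rankB (implementation : String) (k : List (String × String)) : Option Nat :=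
  if implementation = "wolfssh" then
    if pvGet k "type" == some "KEY" then
      some (if pvGet k "direction" == some "OUT" then 0 else 1)
    else none
  else if implementation = "dropbear" then
    -- lbl = key.get('key_label', '') inlined
    if (pvGet k "key_label").getD "" = "C_ENCRYPTION_KEY_CLIENT_TO_SERVER" then some 0
    else if PySem.Str.isIn "ENCRYPTION" ((pvGet k "key_label").getD "") then some 1
    else none
  else if implementation = "openssh" then
    some (if pvGet k "direction" == some "OUT" then 0 else 1)
  else none

-- B's single loop: state = (best = first key achieving the lowest rank so far,
-- fallback = key_hex of the first key carrying 'key_hex'); then the final return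
def skB_go (implementation : String) : List (List (String × String)) →
    Option (Nat × List (String × String)) → Option String → Option String
  | [], best, fb =>
    match best with
    | some (_, bk) => pvGet bk "key_hex"
    | none => fb
  | k :: rest, best, fb =>
    let best' :=
      match rankB implementation k with
      | some r =>
        match best with
        | none => some (r, k)
        | some (br, bk) => if r < br then some (r, k) else some (br, bk)
      | none => best
    let fb' := match fb with
      | some s => some s
      | none => if hasKH k then pvGet k "key_hex" else none
    skB_go implementation rest best' fb'

def select_encryption_key_alt (keys : List (List (String × String))) (implementation : String) : Option String :=
  if keys = [] then none
  else skB_go implementation keys none none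

-- ===== PRECONDITION & SPEC =====
-- Pre_ excludes exactly the inputs on which the Python raises KeyError: the first key matched
-- by the winning preference rule (or, for openssh with no OUT key, keys[0]) lacks 'key_hex'.
def Pre_select_encryption_key (keys : List (List (String × String))) (implementation : String) : Prop :=
  (if implementation = "wolfssh" then
    (match keys.find? pW1 with
     | some k => hasKH k
     | none =>
       match keys.find? pW2 with
       | some k => hasKH k
       | none => true)
  else if implementation = "dropbear" then
    (match keys.find? pD1 with
     | some k => hasKH k
     | none =>
       match keys.find? pD2 with
       | some k => hasKH k
       | none => true)
  else if implementation = "openssh" then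
    (match keys.find? pO with
     | some k => hasKH k
     | none =>
       match keys with
       | [] => true
       | k :: _ => hasKH k)
  else true) = true
instance (keys : List (List (String × String))) (implementation : String) : Decidable (Pre_select_encryption_key keys implementation) := by unfold Pre_select_encryption_key; infer_instance

def pvWitness_select_encryption_key : (List (List (String × String))) × String :=
  ([[("direction", "OUT"), ("type", "KEY"), ("key_hex", "aa")]], "wolfssh")

def Spec_select_encryption_key (keys : List (List (String × String))) (implementation : String) (out : Option String) : Prop := out = select_encryption_key_alt keys implementation
instance (keys : List (List (String × String))) (implementation : String) (out : Option String) : Decidable (Spec_select_encryption_key keys implementation out) := by unfold Spec_select_encryption_key; infer_instance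

-- ===== CLAIM (what is proved, stated in full; the proofs are below) =====
def Claim_equal_select_encryption_key : Prop := ∀ (keys : List (List (String × String))) (implementation : String), Dom_select_encryption_key keys implementation → Pre_select_encryption_key keys implementation → Spec_select_encryption_key keys implementation (select_encryption_key keys implementation)

-- ===== LEMMAS AND PROOFS =====
-- rank-0 predicate and 'has any rank' predicate of B's rank function
def p0 (implementation : String) (k : List (String × String)) : Bool := rankB implementation k == some 0
def pS (implementation : String) (k : List (String × String)) : Bool := (rankB implementation k).isSome

-- B's ultimate fallback as a find?
theorem skA_ult_eq (keys : List (List (String × String))) :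
    skA_ult keys = (keys.find? (fun k => hasKH k)).bind (fun k => pvGet k "key_hex") := by
  induction keys with
  | nil => rfl
  | cons k rest ih => simp only [skA_ult, List.find?]; by_cases h : hasKH k <;> simp [h, ih]

theorem skA_scan_eq (p : List (String × String) → Bool) (keys : List (List (String × String))) :
    skA_scan p keys = (keys.find? p).map (fun k => pvGet k "key_hex") := by
  induction keys with
  | nil => rfl
  | cons k rest ih => simp only [skA_scan, List.find?]; by_cases h : p k <;> simp [h, ih]

-- once best has rank 0 it never changes and decides the result
theorem skB_go_rank0 (impl : String) (keys : List (List (String × String)))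
    (bk : List (String × String)) (fb : Option String) :
    skB_go impl keys (some (0, bk)) fb = pvGet bk "key_hex" := by
  induction keys generalizing fb with
  | nil => rfl
  | cons k rest ih =>
    simp only [skB_go]
    cases h : rankB impl k with
    | none => exact ih _
    | some r => simp only [Nat.not_lt_zero, if_false]; exact ih _

-- with best of rank 1, the result is the first rank-0 key, else best
theorem skB_go_rank1 (impl : String) (keys : List (List (String × String)))
    (bk : List (String × String)) (fb : Option String) :
    skB_go impl keys (some (1, bk)) fb =
      match keys.find? (p0 impl) with
      | some k => pvGet k "key_hex"
      | none => pvGet bk "key_hex" := by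
  induction keys generalizing fb with
  | nil => rfl
  | cons k rest ih =>
    simp only [skB_go, List.find?]
    cases h : rankB impl k with
    | none =>
      have hp0 : p0 impl k = false := by simp [p0, h]
      simp only [hp0, cond_false]; exact ih _
    | some r =>
      by_cases hr : r < 1
      · have hr0 : r = 0 := by omega
        subst hr0
        have hp0 : p0 impl k = true := by simp [p0, h]
        simp only [hp0, cond_true, if_pos (by omega : (0:Nat) < 1)]
        exact skB_go_rank0 impl rest k _
      · have hr0 : r ≠ 0 := by omega
        have hp0 : p0 impl k = false := by simp [p0, h, hr0]
        simp only [hp0, cond_false, if_neg hr]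
        exact ih _

-- characterisation of B's loop from the empty accumulator
theorem skB_go_none (impl : String) (keys : List (List (String × String)))
    (hle : ∀ k r, rankB impl k = some r → r ≤ 1) (fb : Option String) :
    skB_go impl keys none fb =
      match keys.find? (p0 impl) with
      | some k => pvGet k "key_hex"
      | none =>
        match keys.find? (pS impl) with
        | some k => pvGet k "key_hex"
        | none =>
          match fb with
          | some s => some s
          | none => (keys.find? (fun k => hasKH k)).bind (fun k => pvGet k "key_hex") := by
  induction keys generalizing fb with
  | nil => cases fb <;> rfl
  | cons k rest ih =>
    simp only [skB_go, List.find?]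
    cases h : rankB impl k with
    | none =>
      have hp0 : p0 impl k = false := by simp [p0, h]
      have hpS : pS impl k = false := by simp [pS, h]
      simp only [hp0, hpS, cond_false]
      cases fb with
      | some s => rw [ih _]
      | none =>
        by_cases hk : hasKH k
        · rw [ih _]
          simp only [hk, if_pos, cond_true]
          have : (pvGet k "key_hex").isSome := hk
          cases hv : pvGet k "key_hex" with
          | none => simp [hv] at this
          | some v =>
            cases rest.find? (p0 impl) <;> cases rest.find? (pS impl) <;> simp [hv]
        · simp only [hk, if_neg, cond_false]
          rw [ih _]
          simp [hk]
    | some r =>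
      have hr : r ≤ 1 := hle k r h
      interval_cases r
      · have hp0 : p0 impl k = true := by simp [p0, h]
        simp only [hp0, cond_true]
        exact skB_go_rank0 impl rest k _
      · have hp0 : p0 impl k = false := by simp [p0, h]
        have hpS : pS impl k = true := by simp [pS, h]
        simp only [hp0, hpS, cond_false, cond_true]
        rw [skB_go_rank1 impl rest k _]
      
theorem rankB_cases (impl : String) (k : List (String × String)) :
    rankB impl k = none ∨ rankB impl k = some 0 ∨ rankB impl k = some 1 := by
  unfold rankB
  split_ifs <;> simp

theorem rankB_le (impl : String) (k : List (String × String)) (r : Nat)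
    (h : rankB impl k = some r) : r ≤ 1 := by
  rcases rankB_cases impl k with h' | h' | h' <;> rw [h'] at h <;> simp_all <;> omega

theorem find?_ext {α : Type} (p q : α → Bool) (l : List α) (h : ∀ x, p x = q x) :
    l.find? p = l.find? q := by
  have : p = q := funext h
  rw [this]

theorem find?_false {α : Type} (l : List α) : l.find? (fun _ => false) = none := by
  induction l with
  | nil => rfl
  | cons a t ih => simp [List.find?, ih]

theorem find?_true_ne_nil (keys : List (List (String × String))) (h : keys ≠ []) :
    keys.find? (fun _ => true) = keys.head? := by
  cases keys with
  | nil => simp at h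
  | cons k rest => simp [List.find?]

-- pointwise facts matching B's rank predicates with A's scan predicates
theorem p0_wolfssh (k : List (String × String)) : p0 "wolfssh" k = pW1 k := by
  simp only [p0, rankB, if_pos rfl, pW1, pW2]
  by_cases h1 : pvGet k "type" == some "KEY" <;>
    by_cases h2 : pvGet k "direction" == some "OUT" <;> simp [h1, h2]

theorem pS_wolfssh (k : List (String × String)) : pS "wolfssh" k = pW2 k := by
  simp only [pS, rankB, if_pos rfl, pW2]
  by_cases h1 : pvGet k "type" == some "KEY" <;> simp [h1]

theorem p0_dropbear (k : List (String × String)) : p0 "dropbear" k = pD1 k := by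
  simp only [p0, rankB, pD1]
  rw [if_neg (by decide : ¬("dropbear" : String) = "wolfssh")]
  simp only [if_true]
  cases hv : pvGet k "key_label" with
  | none => simp [hv]
  | some v =>
    simp only [hv, Option.getD_some]
    by_cases h : v = "C_ENCRYPTION_KEY_CLIENT_TO_SERVER"
    · simp [h]
    · simp only [if_neg h]
      split_ifs <;> simp [h]

theorem pS_dropbear (k : List (String × String)) : pS "dropbear" k = pD2 k := by
  simp only [pS, rankB, pD2]
  rw [if_neg (by decide : ¬("dropbear" : String) = "wolfssh")]
  simp only [if_true]
  by_cases h : (pvGet k "key_label").getD "" = "C_ENCRYPTION_KEY_CLIENT_TO_SERVER"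
  · -- "ENCRYPTION" is a substring of the client-to-server label
    rw [h]
    decide
  · simp only [if_neg h]
    cases hI : PySem.Str.isIn "ENCRYPTION" ((pvGet k "key_label").getD "") <;> simp

theorem p0_openssh (k : List (String × String)) : p0 "openssh" k = pO k := by
  simp only [p0, rankB, pO]
  rw [if_neg (by decide : ¬("openssh" : String) = "wolfssh"),
      if_neg (by decide : ¬("openssh" : String) = "dropbear")]
  simp only [if_true]
  by_cases h : pvGet k "direction" == some "OUT" <;> simp [h]

theorem pS_openssh (k : List (String × String)) : pS "openssh" k = true := by
  simp only [pS, rankB]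
  rw [if_neg (by decide : ¬("openssh" : String) = "wolfssh"),
      if_neg (by decide : ¬("openssh" : String) = "dropbear")]
  simp

theorem rankB_other (impl : String) (hw : impl ≠ "wolfssh") (hd : impl ≠ "dropbear")
    (ho : impl ≠ "openssh") (k : List (String × String)) : rankB impl k = none := by
  simp [rankB, hw, hd, ho]

-- ===== VERDICT (by name: the statement is the Claim_ definition above) =====
theorem select_encryption_key_spec : Claim_equal_select_encryption_key := by
  intro keys impl _hdom _hpre
  unfold Spec_select_encryption_key select_encryption_key select_encryption_key_alt
  by_cases hnil : keys = []
  · simp [hnil]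
  · simp only [hnil, if_false]
    rw [skB_go_none impl keys (rankB_le impl) none]
    by_cases hw : impl = "wolfssh"
    · subst hw
      rw [if_pos rfl, find?_ext _ _ _ p0_wolfssh, find?_ext _ _ _ pS_wolfssh,
          skA_scan_eq, skA_scan_eq, skA_ult_eq]
      cases h1 : keys.find? pW1 <;> cases h2 : keys.find? pW2 <;> simp [h1, h2]
    · by_cases hd : impl = "dropbear"
      · subst hd
        rw [if_neg (by decide : ¬("dropbear" : String) = "wolfssh"), if_pos rfl,
            find?_ext _ _ _ p0_dropbear, find?_ext _ _ _ pS_dropbear,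
            skA_scan_eq, skA_scan_eq, skA_ult_eq]
        cases h1 : keys.find? pD1 <;> cases h2 : keys.find? pD2 <;> simp [h1, h2]
      · by_cases ho : impl = "openssh"
        · subst ho
          rw [if_neg (by decide : ¬("openssh" : String) = "wolfssh"),
              if_neg (by decide : ¬("openssh" : String) = "dropbear"), if_pos rfl,
              find?_ext _ _ _ p0_openssh, find?_ext _ _ _ pS_openssh,
              find?_true_ne_nil keys hnil, skA_scan_eq]
          cases h1 : keys.find? pO with
          | some k => simp [h1]
          | none =>
            cases keys with
            | nil => simp at hnil
            | cons k rest => simp [h1]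
        · rw [if_neg hw, if_neg hd, if_neg ho, skA_ult_eq]
          have h0 : ∀ k, p0 impl k = false := by
            intro k; simp [p0, rankB_other impl hw hd ho k]
          have hS : ∀ k, pS impl k = false := by
            intro k; simp [pS, rankB_other impl hw hd ho k]
          rw [find?_ext _ (fun _ => false) _ h0, find?_ext _ (fun _ => false) _ hS]
          simp [find?_false]
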